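-- pv_equiv track=rewrite | github.com/GundalaNikhil/DSA | dsa-problems/Queues/solutions/python/QUE-009-customer-service-queue.py | solve
-- ===== SOURCE A (Python) =====
-- def solve(arr):
--     """
--     Battery Lab - First Negative
--     Computes some metric based on the array and first negative element
--     """
--     if not arr:
--         return "0"
--
--     # Find first negative
--     first_neg_idx = -1
--     first_neg_val = None
--     for i, val in enumerate(arr):
--         if val < 0:
--             first_neg_idx = i
--             first_neg_val = val
--             break
--
--     if first_neg_idx == -1:
--         # No negative found - return sum modulo 100
--         return str(sum(arr) % 100)
--
--     # With first negative found
--     # Compute: sum of elements up to first negative + first negative value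
--     prefix_sum = sum(arr[:first_neg_idx])
--     result = prefix_sum + first_neg_val
--
--     return str(result)
-- ===== SOURCE B (Python) =====
-- def solve(arr):
--     """Right-to-left fold: walk the array in reverse, resetting the state to
--     (True, v) at every negative value and otherwise adding v; the last reset
--     seen corresponds to the FIRST negative of arr, so the final accumulator is
--     the prefix sum up to it plus its value (or the total sum if none found)."""
--     found, acc = False, 0
--     for v in reversed(arr):
--         if v < 0:
--             found, acc = True, v
--         else:
--             acc = v + acc
--     return str(acc) if found else str(acc % 100)
-- ===== Notes on version B (the rewrite author's own statement) =====
-- stated objective: alternative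
-- what changed: Replaces A's forward two-pass scheme (enumerate to find the first negative, then re-sum a prefix slice, with separate empty and no-negative branches) with a single right-to-left fold whose (found, acc) state is reset at every negative, so the last reset encountered yields the first-negative answer and no index, slice or early exit is needed.
import Mathlib
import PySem

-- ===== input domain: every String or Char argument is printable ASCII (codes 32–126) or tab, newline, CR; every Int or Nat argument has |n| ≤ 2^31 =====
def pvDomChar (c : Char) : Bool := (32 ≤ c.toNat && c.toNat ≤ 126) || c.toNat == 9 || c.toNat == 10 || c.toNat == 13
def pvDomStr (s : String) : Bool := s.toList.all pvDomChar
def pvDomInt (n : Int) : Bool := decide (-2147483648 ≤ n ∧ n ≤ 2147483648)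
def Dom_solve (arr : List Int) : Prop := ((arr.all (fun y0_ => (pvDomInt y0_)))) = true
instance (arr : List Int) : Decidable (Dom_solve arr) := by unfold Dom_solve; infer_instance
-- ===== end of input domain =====

-- B replaces A's forward two-pass scheme with a single right-to-left fold whose state resets at each negative; objective: alternative.


-- ===== PORT A =====
-- the 'for i, val in enumerate(arr): if val < 0: … break' search
def solveFindNeg : List Int → Nat → Option (Nat × Int)
  | [], _ => none
  | v :: rest, i => if v < 0 then some (i, v) else solveFindNeg rest (i + 1)

def solve (arr : List Int) : String :=
  if arr = [] then "0"
  else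
    match solveFindNeg arr 0 with
    | none => PySem.Int.toStr (PySem.Int.mod arr.sum 100)
    | some (i, v) =>
        let prefixSum := (PySem.List.slice arr none (some (i : Int))).sum
        PySem.Int.toStr (prefixSum + v)

-- ===== PORT B =====
-- 'for v in reversed(arr)' updating (found, acc): foldl over arr.reverse
def solveAltStep (st : Bool × Int) (v : Int) : Bool × Int :=
  if v < 0 then (true, v) else (st.1, v + st.2)

def solve_alt (arr : List Int) : String :=
  let st := arr.reverse.foldl solveAltStep (false, 0)
  if st.1 then PySem.Int.toStr st.2 else PySem.Int.toStr (PySem.Int.mod st.2 100)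

-- ===== PRECONDITION & SPEC =====
def Spec_solve (arr : List Int) (out : String) : Prop := out = solve_alt arr
instance (arr : List Int) (out : String) : Decidable (Spec_solve arr out) := by unfold Spec_solve; infer_instance

-- ===== CLAIM (what is proved, stated in full; the proofs are below) =====
def Claim_equal_solve : Prop := ∀ (arr : List Int), Dom_solve arr → Spec_solve arr (solve arr)

-- ===== LEMMAS AND PROOFS =====
theorem solveFindNeg_le {l : List Int} {j i : Nat} {v : Int}
    (h : solveFindNeg l j = some (i, v)) : j ≤ i := by
  induction l generalizing j with
  | nil => simp [solveFindNeg] at h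
  | cons x rest ih =>
    simp only [solveFindNeg] at h
    split at h
    · simp_all
    · exact Nat.le_of_succ_le (ih h)

-- the right-to-left fold computed as a foldr, characterised against A's search
theorem foldr_step_eq (l : List Int) (j : Nat) :
    l.foldr (fun v st => solveAltStep st v) (false, 0) =
      match solveFindNeg l j with
      | none => (false, l.sum)
      | some (i, v) => (true, (l.take (i - j)).sum + v) := by
  induction l generalizing j with
  | nil => simp [solveFindNeg]
  | cons x rest ih =>
    simp only [List.foldr_cons, solveFindNeg]
    by_cases hx : x < 0
    · simp [hx, solveAltStep]
    · simp only [hx, if_false]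
      rw [ih (j + 1)]
      cases hfind : solveFindNeg rest (j + 1) with
      | none => simp [solveAltStep, hx]
      | some p =>
        obtain ⟨i, v⟩ := p
        have hij : j + 1 ≤ i := solveFindNeg_le hfind
        have : i - j = (i - (j + 1)) + 1 := by omega
        simp [solveAltStep, hx, this, List.take_succ_cons, List.sum_cons]
        ring

-- ===== VERDICT (by name: the statement is the Claim_ definition above) =====
theorem solve_spec : Claim_equal_solve := by
  intro arr _
  unfold Spec_solve solve solve_alt
  rw [List.foldl_reverse, foldr_step_eq arr 0]
  by_cases harr : arr = []
  · subst harr; decide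
  · simp only [harr, if_false]
    cases hfind : solveFindNeg arr 0 with
    | none => simp
    | some p =>
      obtain ⟨i, v⟩ := p
      simp [PySem.List.slice_to_natCast]
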